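-- pv_equiv track=rewrite | github.com/lukerbs/kestrel-seqtools | main.py | compute_alternate_parity
-- ===== SOURCE A (Python) =====
-- PARITY_MASK = 0x3FFF
--
-- def compute_alternate_parity(payload):
--     # alternate parity algorithm for cross-validation
--     # this uses simpler accumulation without rotation
--     plen = len(payload)
--     if plen == 0:
--         return 0
--
--     if plen & 1:
--         payload = payload + "\x00"
--         plen = plen + 1
--
--     acc = 0
--     words = plen / 2
--     i = 0
--
--     while i < words:
--         hb = ord(payload[i * 2])
--         lb = ord(payload[i * 2 + 1])
--
--         # simpler transform (just add)
--         w = (hb << 8) | lb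
--         acc = (acc + w) & 0xFFFFFFFF
--
--         i = i + 1
--
--     return acc & PARITY_MASK
-- ===== SOURCE B (Python) =====
-- PARITY_MASK = 0x3FFF
--
-- def compute_alternate_parity(payload):
--     # staged decomposition: the high bytes of the words are exactly the
--     # even-position characters and the low bytes the odd-position ones
--     # (an odd-length payload's last char is a high byte with implicit 0 low
--     # byte, which the stride reproduces); sum each stride separately and
--     # combine once at the end.
--     high = sum(ord(c) for c in payload[0::2])
--     low = sum(ord(c) for c in payload[1::2])
--     return ((high << 8) + low) & PARITY_MASK
-- ===== Notes on version B (the rewrite author's own statement) =====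
-- stated objective: alternative
-- what changed: B replaces A's word-building while-loop (pad to even length, index arithmetic, per-step 32-bit mask) by two staged strided passes: it sums the even-position characters (high bytes) and odd-position characters (low bytes) separately via payload[0::2]/payload[1::2] and combines them once with ((high<<8)+low) & 0x3FFF.
import Mathlib
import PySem

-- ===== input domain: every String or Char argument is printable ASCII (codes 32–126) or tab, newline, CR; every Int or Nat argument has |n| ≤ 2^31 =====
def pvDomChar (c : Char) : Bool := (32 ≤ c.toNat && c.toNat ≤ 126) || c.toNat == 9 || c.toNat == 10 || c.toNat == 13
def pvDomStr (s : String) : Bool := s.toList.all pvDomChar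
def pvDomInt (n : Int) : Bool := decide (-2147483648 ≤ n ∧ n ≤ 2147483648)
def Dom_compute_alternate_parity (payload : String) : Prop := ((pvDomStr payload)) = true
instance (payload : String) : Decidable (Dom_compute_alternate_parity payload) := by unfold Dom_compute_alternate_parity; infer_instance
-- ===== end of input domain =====

-- B replaces A's pad-and-index word loop by two staged strided passes (sum of the
-- even-position chars and of the odd-position chars, combined once at the end);
-- objective: alternative decomposition, same asymptotic cost.

-- ===== PORT A =====
-- Literal port of A. String indexing payload[i*2] is ported on the char list with
-- PySem.List.pyGetD; the loop keeps every index in range, so the default is never read.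
-- Python's `words = plen / 2` is a float, but plen is even at that point, so it equals plen // 2.
def compute_alternate_parity (payload : String) : Int :=
  let plen : Int := PySem.Str.len payload
  if plen = 0 then 0
  else
    -- `payload = payload + "\x00"` / `plen = plen + 1` on odd length
    let cs : List Char :=
      if PySem.Int.band plen 1 ≠ 0 then payload.toList ++ [Char.ofNat 0] else payload.toList
    let plen2 : Int := if PySem.Int.band plen 1 ≠ 0 then plen + 1 else plen
    let words : Int := PySem.Int.floordiv plen2 2
    let acc : Int := (PySem.List.pyRange 0 words 1).foldl
      (fun acc i =>
        PySem.Int.band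
          (acc + PySem.Int.bor
            (((PySem.List.pyGetD cs (i * 2) (Char.ofNat 0)).toNat : Int) <<< (8 : Nat))
            ((PySem.List.pyGetD cs (i * 2 + 1) (Char.ofNat 0)).toNat : Int))
          0xFFFFFFFF) 0
    PySem.Int.band acc 0x3FFF

-- ===== PORT B =====
-- `high = sum(ord(c) for c in payload[0::2])`, `low = sum(ord(c) for c in payload[1::2])`,
-- `((high << 8) + low) & 0x3FFF`. The strided slices are PySem.Chars.slice? (step 2 is never
-- 0, so `.getD []` is only a totality guard and never read).
def compute_alternate_parity_alt (payload : String) : Int :=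
  let high : Int := ((PySem.Chars.slice? payload.toList (some 0) none 2).getD []).foldl
    (fun a c => a + (c.toNat : Int)) 0
  let low : Int := ((PySem.Chars.slice? payload.toList (some 1) none 2).getD []).foldl
    (fun a c => a + (c.toNat : Int)) 0
  PySem.Int.band ((high <<< (8 : Nat)) + low) 0x3FFF

-- ===== PRECONDITION & SPEC =====
def Spec_compute_alternate_parity (payload : String) (out : Int) : Prop := out = compute_alternate_parity_alt payload
instance (payload : String) (out : Int) : Decidable (Spec_compute_alternate_parity payload out) := by unfold Spec_compute_alternate_parity; infer_instance

-- ===== CLAIM (what is proved, stated in full; the proofs are below) =====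
def Claim_equal_compute_alternate_parity : Prop := ∀ (payload : String), Dom_compute_alternate_parity payload → Spec_compute_alternate_parity payload (compute_alternate_parity payload)

-- ===== LEMMAS AND PROOFS =====

-- characterisation of A's loop: the big-endian word sum
def pvWordSum : List Char → Int → Int
  | [], total => total
  | [hb], total =>
      total + (((hb.toNat : Int)) <<< (8 : Nat) + (((Char.ofNat 0).toNat : Int)))
  | hb :: lb :: rest, total =>
      pvWordSum rest (total + ((hb.toNat : Int) <<< (8 : Nat) + (lb.toNat : Int)))

-- every-other-element list, and its byte sum
def pvEvens : List Char → List Char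
  | [] => []
  | [x] => [x]
  | x :: _ :: r => x :: pvEvens r

def pvCSum : List Char → Nat
  | [] => 0
  | c :: r => c.toNat + pvCSum r

lemma pvBand32 (x : Int) (hx : 0 ≤ x) :
    PySem.Int.band x 4294967295 = x % 4294967296 := by
  rw [PySem.Int.band_of_nonneg hx (by norm_num)]
  rw [show (4294967295 : Int).toNat = 4294967295 from rfl]
  have h1 := Nat.and_two_pow_sub_one_eq_mod x.toNat 32
  norm_num at h1
  omega

lemma pvBand14 (x : Int) (hx : 0 ≤ x) :
    PySem.Int.band x 16383 = x % 16384 := by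
  rw [PySem.Int.band_of_nonneg hx (by norm_num)]
  rw [show (16383 : Int).toNat = 16383 from rfl]
  have h1 := Nat.and_two_pow_sub_one_eq_mod x.toNat 14
  norm_num at h1
  omega

lemma pvShiftCast (h : Nat) : ((h : Int) <<< (8 : Nat)) = ((h <<< 8 : Nat) : Int) := rfl

lemma pvWordEq (h l : Nat) (hl : l < 256) :
    PySem.Int.bor ((h : Int) <<< (8 : Nat)) (l : Int)
      = (h : Int) <<< (8 : Nat) + (l : Int) := by
  rw [pvShiftCast, PySem.Int.bor_natCast]
  have hl' : l < 2 ^ 8 := by simpa using hl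
  have := Nat.shiftLeft_add_eq_or_of_lt (a := h) (i := 8) hl'
  omega

lemma pvWordSum_shift : ∀ (cs : List Char) (t : Int),
    pvWordSum cs t = t + pvWordSum cs 0
  | [], t => by simp [pvWordSum]
  | [x], t => by simp [pvWordSum]
  | x :: y :: rest, t => by
      simp only [pvWordSum]
      rw [pvWordSum_shift rest (t + _), pvWordSum_shift rest (0 + _)]
      ring

lemma pvWordSum_nonneg : ∀ (cs : List Char), 0 ≤ pvWordSum cs 0
  | [] => by simp [pvWordSum]
  | [x] => by
      simp only [pvWordSum, pvShiftCast]
      omega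
  | x :: y :: rest => by
      simp only [pvWordSum, pvShiftCast]
      rw [pvWordSum_shift]
      have := pvWordSum_nonneg rest
      omega

lemma pvWordSum_append_pair : ∀ (cs : List Char) (t : Int) (a b : Char),
    cs.length % 2 = 0 →
    pvWordSum (cs ++ [a, b]) t
      = pvWordSum cs t + ((a.toNat : Int) <<< (8 : Nat) + (b.toNat : Int))
  | [], t, a, b, _ => by simp [pvWordSum]
  | [x], t, a, b, h => by simp at h
  | x :: y :: rest, t, a, b, h => by
      simp only [List.cons_append, pvWordSum]
      exact pvWordSum_append_pair rest _ a b (by simp at h; omega)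

lemma pvWordSum_pad : ∀ (cs : List Char) (t : Int),
    cs.length % 2 = 1 →
    pvWordSum (cs ++ [Char.ofNat 0]) t = pvWordSum cs t
  | [], t, h => by simp at h
  | [x], t, _ => by simp [pvWordSum]
  | x :: y :: rest, t, h => by
      simp only [List.cons_append, pvWordSum]
      exact pvWordSum_pad rest _ (by simp at h; omega)

lemma pvLoop : ∀ (n : Nat) (cs : List Char), 2 * n ≤ cs.length →
    (∀ c ∈ cs, c.toNat < 256) →
    (PySem.List.pyRange 0 (n : Int) 1).foldl
      (fun acc i =>
        PySem.Int.band
          (acc + PySem.Int.bor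
            (((PySem.List.pyGetD cs (i * 2) (Char.ofNat 0)).toNat : Int) <<< (8 : Nat))
            ((PySem.List.pyGetD cs (i * 2 + 1) (Char.ofNat 0)).toNat : Int))
          4294967295) 0
    = pvWordSum (cs.take (2 * n)) 0 % 4294967296 := by
  intro n
  induction n with
  | zero => intro cs _ _; simp [pvWordSum]
  | succ n ih =>
    intro cs hlen hchar
    have hsplit : (((n : Nat) + 1 : Nat) : Int) = (n : Int) + 1 := by push_cast; ring
    rw [hsplit, PySem.List.pyRange_one_succ_right (by positivity), List.foldl_append]
    rw [ih cs (by omega) hchar]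
    simp only [List.foldl_cons, List.foldl_nil]
    have h2n : 2 * n < cs.length := by omega
    have h2n1 : 2 * n + 1 < cs.length := by omega
    have e1 : (n : Int) * 2 = ((2 * n : Nat) : Int) := by push_cast; ring
    have e2 : ((2 * n : Nat) : Int) + 1 = ((2 * n + 1 : Nat) : Int) := by push_cast; ring
    rw [e1, e2, PySem.List.pyGetD_natCast, PySem.List.pyGetD_natCast,
        List.getD_eq_getElem cs _ h2n, List.getD_eq_getElem cs _ h2n1]
    rw [pvWordEq _ _ (hchar _ (cs.getElem_mem h2n1))]
    have htake : cs.take (2 * (n + 1)) = cs.take (2 * n) ++ [cs[2 * n], cs[2 * n + 1]] := by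
      have t1 : cs.take (2 * n + 1) = cs.take (2 * n) ++ [cs[2 * n]] := by
        rw [List.take_add_one, List.getElem?_eq_getElem h2n]; rfl
      have t2 : cs.take (2 * n + 2) = cs.take (2 * n + 1) ++ [cs[2 * n + 1]] := by
        rw [List.take_add_one, List.getElem?_eq_getElem h2n1]; rfl
      have : 2 * (n + 1) = 2 * n + 2 := by ring
      rw [this, t2, t1, List.append_assoc]; rfl
    rw [htake, pvWordSum_append_pair _ _ _ _ (by simp [List.length_take]; omega)]
    have hW := pvWordSum_nonneg (cs.take (2 * n))
    have hw1 : (0 : Int) ≤ ((cs[2 * n].toNat : Int)) <<< (8 : Nat) := by rw [pvShiftCast]; positivity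
    have hw2 : (0 : Int) ≤ (cs[2 * n + 1].toNat : Int) := by positivity
    rw [pvBand32 _ (by have := Int.emod_nonneg (pvWordSum (cs.take (2*n)) 0) (by norm_num : (4294967296:Int) ≠ 0); omega)]
    omega

-- ------- B-side lemmas: the strided slices and their sums -------

lemma pvEvens_cons (x : Char) (r : List Char) :
    pvEvens (x :: r) = x :: pvEvens r.tail := by
  cases r <;> simp [pvEvens]

lemma pvFoldSum : ∀ (l : List Char) (t : Int),
    l.foldl (fun a c => a + (c.toNat : Int)) t = t + (pvCSum l : Int)
  | [], t => by simp [pvCSum]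
  | c :: r, t => by
      simp only [List.foldl_cons, pvCSum, pvFoldSum r]
      push_cast
      ring

lemma pvMapRange : ∀ (xs : List Char),
    (List.range ((xs.length + 1) / 2)).filterMap (fun k => xs[2 * k]?) = pvEvens xs
  | [] => by simp [pvEvens]
  | [x] => by simp [pvEvens, List.range_succ]
  | x :: y :: r => by
      have hcnt : ((x :: y :: r).length + 1) / 2 = (r.length + 1) / 2 + 1 := by
        simp; omega
      rw [hcnt, List.range_succ_eq_map, List.filterMap_cons, List.filterMap_map]
      have h0 : (x :: y :: r)[2 * 0]? = some x := by simp
      simp only [h0]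
      have hfc : ∀ k, ((fun k => (x :: y :: r)[2 * k]?) ∘ (· + 1)) k = r[2 * k]? := by
        intro k
        simp only [Function.comp]
        have : 2 * (k + 1) = 2 * k + 1 + 1 := by ring
        rw [this]
        simp
      rw [List.filterMap_congr (fun k _ => hfc k), pvMapRange r]
      simp [pvEvens]

lemma pvWordSum_split : ∀ (cs : List Char),
    pvWordSum cs 0 = 256 * (pvCSum (pvEvens cs) : Int) + (pvCSum (pvEvens cs.tail) : Int)
  | [] => by simp [pvWordSum, pvEvens, pvCSum]
  | [x] => by
      simp only [pvWordSum, pvEvens, pvCSum, pvShiftCast, List.tail_cons]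
      simp [Nat.shiftLeft_eq]
      ring
  | x :: y :: r => by
      simp only [pvWordSum, List.tail_cons]
      rw [pvWordSum_shift, pvWordSum_split r]
      have h1 : pvEvens (x :: y :: r) = x :: pvEvens r := by simp [pvEvens]
      have h2 : pvEvens (y :: r) = y :: pvEvens r.tail := pvEvens_cons y r
      rw [h1, h2]
      simp only [pvCSum, pvShiftCast]
      simp [Nat.shiftLeft_eq]
      ring

lemma pvSlice0 (xs : List Char) :
    PySem.List.slice? xs (some 0) none 2 = some (pvEvens xs) := by
  rw [← pvMapRange xs]
  simp only [PySem.List.slice?, PySem.List.sliceIndices]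
  norm_num
  have hc : (if 0 < xs.length then (((xs.length : Int) + 2 - 1) / 2).toNat else 0)
      = (xs.length + 1) / 2 := by split <;> omega
  rw [hc]
  exact List.filterMap_congr fun k _ => by
    have h : ((2 : Int) * (k : Int)).toNat = 2 * k := by omega
    rw [h]

lemma pvSlice1 : ∀ (xs : List Char),
    PySem.List.slice? xs (some 1) none 2 = some (pvEvens xs.tail)
  | [] => by decide
  | x :: t => by
      rw [show (x :: t).tail = t from rfl, ← pvMapRange t]
      simp only [PySem.List.slice?, PySem.List.sliceIndices]
      norm_num
      have hc : (if 0 < t.length then (((t.length : Int) + 2 - 1) / 2).toNat else 0)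
          = (t.length + 1) / 2 := by split <;> omega
      rw [hc]
      exact List.filterMap_congr fun k _ => by
        have h : ((1 : Int) + 2 * (k : Int)).toNat = 2 * k + 1 := by omega
        rw [h]
        simp

-- the alt port in closed form
lemma pvAltEq (payload : String) :
    compute_alternate_parity_alt payload
      = PySem.Int.band (pvWordSum payload.toList 0) 16383 := by
  unfold compute_alternate_parity_alt
  simp only [PySem.Chars.slice?, pvSlice0, pvSlice1, Option.getD_some]
  rw [pvFoldSum, pvFoldSum]
  rw [pvWordSum_split payload.toList]
  norm_num [pvShiftCast, Nat.shiftLeft_eq]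
  ring_nf

-- ===== VERDICT (by name: the statement is the Claim_ definition above) =====
theorem compute_alternate_parity_spec : Claim_equal_compute_alternate_parity := by
  intro payload hdom
  unfold Spec_compute_alternate_parity
  rw [pvAltEq]
  unfold compute_alternate_parity
  have hchar : ∀ c ∈ payload.toList, c.toNat < 256 := by
    intro c hc
    have := List.all_eq_true.mp hdom c hc
    simp [pvDomChar] at this
    omega
  simp only [PySem.Str.len_eq]
  by_cases h0 : payload.toList.length = 0
  · simp only [h0]
    norm_num
    rw [List.length_eq_zero_iff.mp h0]
    simp [pvWordSum]
    decide
  · have hne : ¬ ((payload.toList.length : Int) = 0) := by exact_mod_cast h0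
    rw [if_neg hne]
    set L := payload.toList.length with hL
    by_cases hodd : L % 2 = 1
    · have hband : PySem.Int.band (L : Int) 1 ≠ 0 := by
        rw [PySem.Int.band_one]
        have : PySem.Int.mod (L : Int) 2 = ((L % 2 : Nat) : Int) := PySem.Int.mod_natCast L 2
        rw [this, hodd]; norm_num
      rw [if_pos hband, if_pos hband]
      have hplen2 : (L : Int) + 1 = ((L + 1 : Nat) : Int) := by push_cast; ring
      rw [hplen2]
      have hfd : PySem.Int.floordiv (((L + 1 : Nat)) : Int) 2 = (((L + 1) / 2 : Nat) : Int) := by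
        exact_mod_cast PySem.Int.floordiv_natCast (L + 1) 2
      rw [hfd]
      set cs := payload.toList ++ [Char.ofNat 0] with hcs
      have hlencs : cs.length = L + 1 := by rw [hcs, List.length_append, ← hL]; rfl
      have heven : 2 * ((L + 1) / 2) = L + 1 := by omega
      have hchar' : ∀ c ∈ cs, c.toNat < 256 := by
        intro c hc
        rcases List.mem_append.mp hc with h | h
        · exact hchar c h
        · simp at h; subst h; decide
      rw [pvLoop ((L + 1) / 2) cs (by omega) hchar']
      rw [heven, ← hlencs, List.take_length]
      rw [hcs, pvWordSum_pad _ _ hodd]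
      have hW := pvWordSum_nonneg payload.toList
      rw [pvBand14 _ (by have := Int.emod_nonneg (pvWordSum payload.toList 0) (by norm_num : (4294967296:Int) ≠ 0); omega),
          pvBand14 _ hW]
      omega
    · have heq : L % 2 = 0 := by omega
      have hband : ¬ (PySem.Int.band (L : Int) 1 ≠ 0) := by
        rw [PySem.Int.band_one]
        have : PySem.Int.mod (L : Int) 2 = ((L % 2 : Nat) : Int) := PySem.Int.mod_natCast L 2
        rw [this, heq]; norm_num
      rw [if_neg hband, if_neg hband]
      rw [← hL]
      have hfd : PySem.Int.floordiv ((L : Nat) : Int) 2 = ((L / 2 : Nat) : Int) := by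
        exact_mod_cast PySem.Int.floordiv_natCast L 2
      rw [hfd]
      have heven : 2 * (L / 2) = L := by omega
      rw [pvLoop (L / 2) payload.toList (by omega) hchar]
      rw [heven, hL, List.take_length]
      have hW := pvWordSum_nonneg payload.toList
      rw [pvBand14 _ (by have := Int.emod_nonneg (pvWordSum payload.toList 0) (by norm_num : (4294967296:Int) ≠ 0); omega),
          pvBand14 _ hW]
      omega
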